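-- pv_equiv track=rewrite | github.com/gennaBnh/KineticEFMPy- | metatool_to_asp/metatool_to_asp_efm.py | comparaison
-- ===== SOURCE A (Python) =====
-- def comparaison(l_metatool, dict_pkl):
--     l_metatool.sort()
--     efm_same_length = {}
--     for efm in dict_pkl: #stockage des efms ayant le même nombre de réactions que celui de metatool dans un dico
--         if len(dict_pkl[efm]) == len(l_metatool):
--             efm_same_length[efm] = dict_pkl[efm]
--     for efm in efm_same_length: #recherche de l'efm ayant les mêmes réactions parmi les efms ayant le même nombre de réactions
--         if(set(efm_same_length[efm]) == set(l_metatool)):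
--             return efm
-- ===== SOURCE B (Python) =====
-- def comparaison(l_metatool, dict_pkl):
--     l_metatool.sort()
--     index = {}
--     for efm, rxns in dict_pkl.items():
--         key = (len(rxns), tuple(sorted(set(rxns))))
--         if key not in index:
--             index[key] = efm
--     return index.get((len(l_metatool), tuple(sorted(set(l_metatool)))))
-- ===== Notes on version B (the rewrite author's own statement) =====
-- stated objective: alternative
-- what changed: A filters dict entries of matching length into a second dict and then rescans it comparing sets; B builds one hash index keyed by (length, sorted distinct reactions) in a single pass and answers with a single O(1) lookup.
import Mathlib
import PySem

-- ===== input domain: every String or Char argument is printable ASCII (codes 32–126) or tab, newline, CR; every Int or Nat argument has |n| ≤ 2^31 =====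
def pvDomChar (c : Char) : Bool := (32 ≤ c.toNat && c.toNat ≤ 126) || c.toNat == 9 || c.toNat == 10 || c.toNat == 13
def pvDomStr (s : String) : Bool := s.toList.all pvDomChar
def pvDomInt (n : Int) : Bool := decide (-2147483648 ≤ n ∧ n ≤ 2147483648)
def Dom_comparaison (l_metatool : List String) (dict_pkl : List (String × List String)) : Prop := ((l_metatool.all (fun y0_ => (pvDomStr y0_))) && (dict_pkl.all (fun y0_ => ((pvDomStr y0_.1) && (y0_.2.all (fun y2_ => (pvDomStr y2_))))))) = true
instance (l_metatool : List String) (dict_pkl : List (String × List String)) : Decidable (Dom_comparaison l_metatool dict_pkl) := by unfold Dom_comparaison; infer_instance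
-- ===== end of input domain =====

-- B replaces A's filter-then-rescan with a one-pass index keyed by (length, sorted distinct
-- reactions) and a single lookup (objective: alternative). A sorts l_metatool in place; the
-- equivalence proved here is about the RETURN value (B keeps the same in-place sort).


-- ===== PORT A =====
-- second loop of A: 'for efm in efm_same_length: if set(efm_same_length[efm]) == set(l_metatool): return efm'
def aScan (same : PySem.Dict String (List String)) (target : List String) : List String → Option String
  | [] => none
  | k :: ks =>
      if PySem.Set.equal (PySem.Set.ofList (same.getD k [])) (PySem.Set.ofList target)
      then some k else aScan same target ks

def comparaison (l_metatool : List String) (dict_pkl : List (String × List String)) : Option String :=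
  -- l_metatool.sort() (in-place; the rest of A reads the sorted list)
  let ls := PySem.List.sorted l_metatool (fun x => x) false
  let dp : PySem.Dict String (List String) := PySem.Dict.mk dict_pkl
  -- first loop: efm_same_length[efm] = dict_pkl[efm] when len(dict_pkl[efm]) == len(l_metatool)
  let same : PySem.Dict String (List String) :=
    dict_pkl.foldl (fun acc kv =>
      if (dp.getD kv.1 []).length == ls.length
      then acc.insert kv.1 (dp.getD kv.1 []) else acc) PySem.Dict.empty
  aScan same ls same.keys

-- ===== PORT B =====
-- key = (len(rxns), tuple(sorted(set(rxns))))
def bKey (xs : List String) : Nat × List String :=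
  (xs.length, PySem.List.sorted (PySem.Set.ofList xs) (fun x => x) false)

def comparaison_alt (l_metatool : List String) (dict_pkl : List (String × List String)) : Option String :=
  let ls := PySem.List.sorted l_metatool (fun x => x) false
  let index : PySem.Dict (Nat × List String) String :=
    dict_pkl.foldl (fun d kv =>
      if d.contains (bKey kv.2) then d else d.insert (bKey kv.2) kv.1) PySem.Dict.empty
  index.get? (bKey ls)

-- ===== PRECONDITION & SPEC =====
-- Pre_ excludes association lists with duplicate keys: they do not correspond to any Python
-- input here (dict_pkl is a Python dict, whose keys are necessarily distinct).
def Pre_comparaison (l_metatool : List String) (dict_pkl : List (String × List String)) : Prop :=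
  (dict_pkl.map Prod.fst).Nodup
instance (l_metatool : List String) (dict_pkl : List (String × List String)) : Decidable (Pre_comparaison l_metatool dict_pkl) := by unfold Pre_comparaison; infer_instance
def pvWitness_comparaison : List String × (List (String × List String)) :=
  (["b", "a"], [("e1", ["c"]), ("e2", ["a", "b"])])

def Spec_comparaison (l_metatool : List String) (dict_pkl : List (String × List String)) (out : Option String) : Prop := out = comparaison_alt l_metatool dict_pkl
instance (l_metatool : List String) (dict_pkl : List (String × List String)) (out : Option String) : Decidable (Spec_comparaison l_metatool dict_pkl out) := by unfold Spec_comparaison; infer_instance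

-- ===== CLAIM (what is proved, stated in full; the proofs are below) =====
def Claim_equal_comparaison : Prop := ∀ (l_metatool : List String) (dict_pkl : List (String × List String)), Dom_comparaison l_metatool dict_pkl → Pre_comparaison l_metatool dict_pkl → Spec_comparaison l_metatool dict_pkl (comparaison l_metatool dict_pkl)

-- ===== LEMMAS AND PROOFS =====

-- B's index fold answers the lookup k0 with the first entry whose key is k0.
theorem bfold_get? (dp : List (String × List String)) (d : PySem.Dict (Nat × List String) String)
    (k0 : Nat × List String) :
    (dp.foldl (fun d kv => if d.contains (bKey kv.2) then d else d.insert (bKey kv.2) kv.1) d).get? k0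
      = ((d.get? k0).orElse (fun _ => (dp.find? (fun kv => bKey kv.2 == k0)).map Prod.fst)) := by
  induction dp generalizing d with
  | nil => cases h : d.get? k0 <;> simp [Option.orElse, h]
  | cons kv t ih =>
    simp only [List.foldl_cons, List.find?_cons]
    by_cases hc : d.contains (bKey kv.2)
    · simp only [hc, if_true]
      rw [ih]
      by_cases hk : bKey kv.2 == k0
      · have hk' : bKey kv.2 = k0 := eq_of_beq hk
        have : (d.get? k0).isSome := by
          rw [← PySem.Dict.contains_eq_isSome_get?, ← hk']; exact hc
        obtain ⟨v, hv⟩ := Option.isSome_iff_exists.mp this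
        simp [hv, Option.orElse]
      · simp [hk]
    · simp only [hc, if_false, Bool.false_eq_true]
      rw [ih]
      by_cases hk : bKey kv.2 == k0
      · have hk' : bKey kv.2 = k0 := eq_of_beq hk
        have hn : d.get? k0 = none := by
          rw [← hk']
          rw [PySem.Dict.get?_eq_none_iff_contains]
          simpa using hc
        simp [hk', hn, Option.orElse, PySem.Dict.get?_insert_self]
      · have hne : k0 ≠ bKey kv.2 := fun h => hk (by simp [h])
        simp [hk, PySem.Dict.get?_insert_of_ne, hne]

-- A's first loop inserts only fresh keys (keys of dict_pkl are Nodup), so `same` is a filter.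
theorem afold_items (dp : List (String × List String)) (L : Nat)
    (hnd : (dp.map Prod.fst).Nodup) :
    ((dp.foldl (fun acc kv =>
        if ((PySem.Dict.mk dp).getD kv.1 []).length == L
        then acc.insert kv.1 ((PySem.Dict.mk dp).getD kv.1 []) else acc) PySem.Dict.empty)).items
      = dp.filter (fun kv => kv.2.length == L) := by
  have hval : ∀ kv ∈ dp, (PySem.Dict.mk dp).getD kv.1 [] = kv.2 := by
    intro kv hkv
    exact PySem.Dict.getD_of_mem_items (PySem.Dict.mk dp)
      (by simpa using hkv) (by simpa using hnd) []
  rw [PySem.List.foldl_if_eq_foldl_filter]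
  rw [List.filter_congr (fun kv hkv => by rw [hval kv hkv])]
  rw [PySem.Dict.items_foldl_insert_fresh (dp.filter (fun kv => kv.2.length == L))
        Prod.fst (fun kv => (PySem.Dict.mk dp).getD kv.1 []) PySem.Dict.empty
        (by intro a _; exact PySem.Dict.contains_empty _)
        (hnd.sublist ((List.filter_sublist (l := dp)).map Prod.fst))]
  rw [List.map_congr_left (fun kv hkv => by
        rw [hval kv (List.mem_of_mem_filter hkv)])]
  simp [PySem.Dict.empty]

-- aScan over any key list is find? over the corresponding (key, lookup) pairs.
theorem aScan_eq_find?_aux (same : PySem.Dict String (List String)) (target : List String)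
    (ks : List String) :
    aScan same target ks
      = ((ks.map (fun k => (k, same.getD k []))).find? (fun kv =>
          PySem.Set.equal (PySem.Set.ofList kv.2) (PySem.Set.ofList target))).map Prod.fst := by
  induction ks with
  | nil => rfl
  | cons k ks ih =>
    simp only [aScan, List.map_cons, List.find?_cons]
    by_cases h : PySem.Set.equal (PySem.Set.ofList (same.getD k [])) (PySem.Set.ofList target)
    · simp [h]
    · simp only [h, Bool.false_eq_true, if_false]
      rw [ih]

-- aScan over the keys of a Nodup-keyed dict is find? over its items.
theorem aScan_eq_find? (same : PySem.Dict String (List String)) (target : List String)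
    (hnd : same.keys.Nodup) :
    aScan same target same.keys
      = (same.items.find? (fun kv =>
          PySem.Set.equal (PySem.Set.ofList kv.2) (PySem.Set.ofList target))).map Prod.fst := by
  rw [PySem.Dict.items_eq_map_keys same hnd []]
  exact aScan_eq_find?_aux same target same.keys

-- the two selection predicates agree: same length & same set  ↔  same (length, sorted set) key
theorem pred_eq (a ls : List String) :
    ((a.length == ls.length) && PySem.Set.equal (PySem.Set.ofList a) (PySem.Set.ofList ls))
      = (bKey a == bKey ls) := by
  rw [Bool.eq_iff_iff]
  simp only [Bool.and_eq_true, beq_iff_eq, Prod.mk.injEq, PySem.Set.equal_iff, bKey]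
  constructor
  · rintro ⟨h1, h2⟩
    refine ⟨h1, ?_⟩
    rw [PySem.List.sorted_id_eq_sorted_id_iff_perm]
    exact (List.perm_ext_iff_of_nodup (PySem.Set.nodup_ofList a) (PySem.Set.nodup_ofList ls)).mpr h2
  · rintro ⟨h1, h2⟩
    refine ⟨h1, ?_⟩
    rw [PySem.List.sorted_id_eq_sorted_id_iff_perm] at h2
    exact (List.perm_ext_iff_of_nodup (PySem.Set.nodup_ofList a) (PySem.Set.nodup_ofList ls)).mp h2

theorem find?_filter_fuse {α : Type} (l : List α) (p q : α → Bool) :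
    ((l.filter p).find? q) = l.find? (fun x => p x && q x) := by
  induction l with
  | nil => rfl
  | cons x t ih =>
    by_cases hp : p x
    · by_cases hq : q x
      · simp [hp, hq]
      · simp [hp, hq, ih]
    · simp [hp, ih]

-- ===== VERDICT (by name: the statement is the Claim_ definition above) =====
theorem comparaison_spec : Claim_equal_comparaison := by
  intro l dp _ hpre
  unfold Spec_comparaison
  simp only [comparaison, comparaison_alt]
  have hitems := afold_items dp (PySem.List.sorted l (fun x => x) false).length hpre
  have hkeys : ((dp.foldl (fun acc kv =>
        if ((PySem.Dict.mk dp).getD kv.1 []).length == (PySem.List.sorted l (fun x => x) false).length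
        then acc.insert kv.1 ((PySem.Dict.mk dp).getD kv.1 []) else acc) PySem.Dict.empty)).keys.Nodup := by
    simp only [PySem.Dict.keys, hitems]
    exact hpre.sublist ((List.filter_sublist (l := dp)).map Prod.fst)
  rw [aScan_eq_find? _ _ hkeys, hitems, find?_filter_fuse, bfold_get?]
  have hpred : (fun (kv : String × List String) =>
        (kv.2.length == (PySem.List.sorted l (fun x => x) false).length) &&
          PySem.Set.equal (PySem.Set.ofList kv.2)
            (PySem.Set.ofList (PySem.List.sorted l (fun x => x) false)))
      = (fun kv => bKey kv.2 == bKey (PySem.List.sorted l (fun x => x) false)) :=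
    funext fun kv => pred_eq kv.2 _
  rw [hpred]
  simp [Option.orElse, PySem.Dict.empty, PySem.Dict.get?]
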